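-- pv_equiv track=rewrite | github.com/qishe-nlp/sencore | sencore/phrase_model_parser.py | align_back_to_tokens
-- ===== SOURCE A (Python) =====
-- def align_back_to_tokens(word_ids, subtokens):
--   assert(len(word_ids) == len(subtokens))
--
--   tokens = []
--   previous_idx = None
--
--   for i, word_idx in enumerate(word_ids):
--     if word_idx is not None and word_idx != previous_idx:
--       tokens.append(subtokens[i])
--     elif word_idx is not None and word_idx == previous_idx:
--       tokens[-1] = tokens[-1]+subtokens[i][2:]
--     previous_idx = word_idx
--   return tokens
-- ===== SOURCE B (Python) =====
-- def align_back_to_tokens(word_ids, subtokens):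
--   assert(len(word_ids) == len(subtokens))
--   pairs = list(zip(word_ids, subtokens))
--   tokens = []
--   i = 0
--   n = len(pairs)
--   while i < n:
--     wid = pairs[i][0]
--     j = i + 1
--     while j < n and pairs[j][0] == wid:
--       j += 1
--     if wid is not None:
--       group = pairs[i:j]
--       tokens.append(group[0][1] + ''.join(s[2:] for _, s in group[1:]))
--     i = j
--   return tokens
-- ===== Notes on version B (the rewrite author's own statement) =====
-- stated objective: alternative
-- what changed: Replaces A's stateful single pass carrying previous_idx (appending or extending tokens[-1] element by element) by grouping maximal runs of consecutive equal word ids over the zipped pairs and emitting each non-None group's token at once as first-subtoken + ''.join of the rest's s[2:].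
import Mathlib
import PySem

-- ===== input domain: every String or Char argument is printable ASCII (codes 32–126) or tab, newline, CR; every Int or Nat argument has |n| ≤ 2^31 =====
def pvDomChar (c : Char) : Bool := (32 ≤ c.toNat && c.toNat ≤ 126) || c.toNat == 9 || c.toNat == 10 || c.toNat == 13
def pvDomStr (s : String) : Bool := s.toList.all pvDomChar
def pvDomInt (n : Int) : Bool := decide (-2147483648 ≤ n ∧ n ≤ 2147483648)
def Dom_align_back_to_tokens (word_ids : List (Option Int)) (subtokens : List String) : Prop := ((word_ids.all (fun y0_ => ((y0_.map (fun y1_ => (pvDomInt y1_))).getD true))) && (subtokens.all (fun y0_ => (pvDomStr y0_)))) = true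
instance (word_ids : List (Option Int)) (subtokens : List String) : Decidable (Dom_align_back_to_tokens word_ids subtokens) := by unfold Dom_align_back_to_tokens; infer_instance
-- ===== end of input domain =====

-- B replaces A's stateful previous_idx pass by grouping consecutive equal word ids and
-- joining each non-None group's continuation subtokens (objective: alternative decomposition).

-- ===== PORT A =====
-- tokens[-1] = tokens[-1] + x  (A only reaches this with tokens nonempty)
def pvSetLastCatA (tokens : List String) (x : String) : List String :=
  tokens.dropLast ++ [tokens.getLastD "" ++ x]

-- the for-loop of A: state = (tokens, previous_idx); under Pre_ the index pairing
-- 'enumerate(word_ids)' with 'subtokens[i]' is exactly the zip of the two lists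
def pvGoA : List (Option Int × String) → List String → Option Int → List String
  | [], tokens, _ => tokens
  | (wid, s) :: rest, tokens, prev =>
    if wid ≠ none ∧ wid ≠ prev then
      pvGoA rest (tokens ++ [s]) wid
    else if wid ≠ none ∧ wid = prev then
      pvGoA rest (pvSetLastCatA tokens (PySem.Str.slice s (some 2) none)) wid
    else
      pvGoA rest tokens wid

def align_back_to_tokens (word_ids : List (Option Int)) (subtokens : List String) : List String :=
  pvGoA (word_ids.zip subtokens) [] none

-- ===== PORT B =====
-- B: take the maximal run of pairs sharing the head's word id; skip it if the id is None,
-- otherwise emit first subtoken + ''.join(s[2:] of the rest); continue after the run.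
def pvGoB : List (Option Int × String) → List String
  | [] => []
  | (wid, s) :: rest =>
    let grp := rest.takeWhile (fun p => p.1 == wid)
    let rest' := rest.dropWhile (fun p => p.1 == wid)
    match wid with
    | none => pvGoB rest'
    | some _ =>
      (s ++ PySem.Str.join "" (grp.map (fun p => PySem.Str.slice p.2 (some 2) none))) :: pvGoB rest'
termination_by l => l.length
decreasing_by
  all_goals exact Nat.lt_succ_of_le (List.length_dropWhile_le _ rest)

def align_back_to_tokens_alt (word_ids : List (Option Int)) (subtokens : List String) : List String :=
  pvGoB (word_ids.zip subtokens)

-- ===== PRECONDITION & SPEC =====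
-- A's assert raises AssertionError when the two lists have different lengths; Pre_ excludes exactly that.
def Pre_align_back_to_tokens (word_ids : List (Option Int)) (subtokens : List String) : Prop :=
  word_ids.length = subtokens.length
instance (word_ids : List (Option Int)) (subtokens : List String) : Decidable (Pre_align_back_to_tokens word_ids subtokens) := by unfold Pre_align_back_to_tokens; infer_instance

def pvWitness_align_back_to_tokens : List (Option Int) × List String :=
  ([some 0, some 0, none, some 1], ["he", "##llo", ",", "you"])

def Spec_align_back_to_tokens (word_ids : List (Option Int)) (subtokens : List String) (out : List String) : Prop := out = align_back_to_tokens_alt word_ids subtokens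
instance (word_ids : List (Option Int)) (subtokens : List String) (out : List String) : Decidable (Spec_align_back_to_tokens word_ids subtokens out) := by unfold Spec_align_back_to_tokens; infer_instance

-- ===== CLAIM (what is proved, stated in full; the proofs are below) =====
def Claim_equal_align_back_to_tokens : Prop := ∀ (word_ids : List (Option Int)) (subtokens : List String), Dom_align_back_to_tokens word_ids subtokens → Pre_align_back_to_tokens word_ids subtokens → Spec_align_back_to_tokens word_ids subtokens (align_back_to_tokens word_ids subtokens)

-- ===== LEMMAS AND PROOFS =====

-- ''.join distributes over cons
lemma pvJoin_empty_cons (x : String) (xs : List String) :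
    PySem.Str.join "" (x :: xs) = x ++ PySem.Str.join "" xs := by
  cases xs with
  | nil => simp [PySem.Str.join, PySem.Chars.join_singleton, PySem.Chars.join_nil]
  | cons y ys => simp [PySem.Str.join, PySem.Chars.join_cons_cons]

-- skipping a None pair one at a time agrees with B's run-skipping
lemma pvGoB_none_cons (s : String) (rest : List (Option Int × String)) :
    pvGoB ((none, s) :: rest) = pvGoB rest := by
  rw [pvGoB.eq_def]
  cases rest with
  | nil => simp [pvGoB]
  | cons p r =>
    obtain ⟨w, t⟩ := p
    cases w with
    | none =>
      conv_rhs => rw [pvGoB.eq_def]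
      simp
    | some m => simp

-- the main invariant, both loop states at once, by strong induction on the list length
lemma pvGoA_eq_goB (n : Nat) : ∀ l : List (Option Int × String), l.length ≤ n →
    (∀ tokens, pvGoA l tokens none = tokens ++ pvGoB l) ∧
    (∀ (tokens : List String) (t : String) (k : Int),
      pvGoA l (tokens ++ [t]) (some k) =
        tokens ++ ((t ++ PySem.Str.join ""
            ((l.takeWhile (fun p => p.1 == some k)).map (fun p => PySem.Str.slice p.2 (some 2) none)))
          :: pvGoB (l.dropWhile (fun p => p.1 == some k)))) := by
  induction n with
  | zero =>
    intro l hl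
    have : l = [] := List.eq_nil_of_length_eq_zero (Nat.le_zero.mp hl)
    subst this
    constructor
    · intro tokens; simp [pvGoA, pvGoB]
    · intro tokens t k
      simp [pvGoA, pvGoB, PySem.Str.join, PySem.Chars.join_nil, String.append_empty]
  | succ n ih =>
    intro l hl
    cases l with
    | nil =>
      constructor
      · intro tokens; simp [pvGoA, pvGoB]
      · intro tokens t k
        simp [pvGoA, pvGoB, PySem.Str.join, PySem.Chars.join_nil, String.append_empty]
    | cons p rest =>
      obtain ⟨wid, s⟩ := p
      have hrest : rest.length ≤ n := by simpa using Nat.lt_succ_iff.mp (by simpa using hl)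
      constructor
      · intro tokens
        cases wid with
        | none =>
          rw [pvGoA]; simp only [ne_eq, not_true_eq_false, false_and, if_false]
          rw [(ih rest hrest).1 tokens, pvGoB_none_cons]
        | some m =>
          rw [pvGoA, if_pos ⟨by simp, by simp⟩]
          rw [(ih rest hrest).2 tokens s m]
          conv_rhs => rw [pvGoB.eq_def]
      · intro tokens t k
        cases wid with
        | none =>
          rw [pvGoA]; simp only [ne_eq, not_true_eq_false, false_and, if_false]
          rw [(ih rest hrest).1 (tokens ++ [t])]
          have htw : ((none, s) :: rest).takeWhile (fun p => p.1 == some k) = [] := by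
            simp
          have hdw : ((none, s) :: rest).dropWhile (fun p => p.1 == some k) = (none, s) :: rest := by
            rw [List.dropWhile_cons]; simp
          rw [htw, hdw, pvGoB_none_cons]
          simp [PySem.Str.join, PySem.Chars.join_nil, String.append_empty]
        | some m =>
          by_cases hm : m = k
          · subst hm
            rw [pvGoA, if_neg (by simp), if_pos ⟨by simp, rfl⟩]
            have hset : pvSetLastCatA (tokens ++ [t]) (PySem.Str.slice s (some 2) none)
                = tokens ++ [t ++ PySem.Str.slice s (some 2) none] := by
              simp [pvSetLastCatA]
            rw [hset, (ih rest hrest).2 tokens (t ++ PySem.Str.slice s (some 2) none) m]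
            have htw : ((some m, s) :: rest).takeWhile (fun p => p.1 == some m)
                = (some m, s) :: rest.takeWhile (fun p => p.1 == some m) := by
              simp
            have hdw : ((some m, s) :: rest).dropWhile (fun p => p.1 == some m)
                = rest.dropWhile (fun p => p.1 == some m) := by
              simp
            rw [htw, hdw]
            simp only [List.map_cons, pvJoin_empty_cons, ← String.append_assoc]
          · rw [pvGoA, if_pos ⟨by simp, by simp [hm]⟩]
            rw [(ih rest hrest).2 (tokens ++ [t]) s m]
            have htw : ((some m, s) :: rest).takeWhile (fun p => p.1 == some k) = [] := by
              simp [hm]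
            have hdw : ((some m, s) :: rest).dropWhile (fun p => p.1 == some k)
                = (some m, s) :: rest := by
              simp [hm]
            rw [htw, hdw]
            conv_rhs => rw [pvGoB.eq_def]
            simp [PySem.Str.join, PySem.Chars.join_nil]

-- ===== VERDICT (by name: the statement is the Claim_ definition above) =====
theorem align_back_to_tokens_spec : Claim_equal_align_back_to_tokens := by
  intro word_ids subtokens _ _
  unfold Spec_align_back_to_tokens align_back_to_tokens align_back_to_tokens_alt
  simpa using (pvGoA_eq_goB (word_ids.zip subtokens).length (word_ids.zip subtokens) le_rfl).1 []
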